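-- pv_equiv track=rewrite | github.com/posl/comment_recommendation | script/split_gen/3_time/zh/216_C/4.py | f
-- ===== SOURCE A (Python) =====
-- def f(n):
--     if n == 0:
--         return ''
--     if n == 1:
--         return 'A'
--     if n % 2 == 0:
--         return f(n // 2) + 'B'
--     else:
--         return f(n - 1) + 'A'
-- ===== SOURCE B (Python) =====
-- def f(n):
--     if n == 0:
--         return ''
--     out = []
--     while n > 1:
--         if n % 2 == 0:
--             out.append('B')
--             n //= 2
--         else:
--             out.append('A')
--             n -= 1
--     out.append('A')
--     return ''.join(reversed(out))
-- ===== Notes on version B (the rewrite author's own statement) =====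
-- stated objective: idiomatic
-- what changed: Replaces the recursion with an explicit while-loop that collects the emitted characters into a list and joins them reversed at the end, avoiding recursion depth and repeated string concatenation.
import Mathlib
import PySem

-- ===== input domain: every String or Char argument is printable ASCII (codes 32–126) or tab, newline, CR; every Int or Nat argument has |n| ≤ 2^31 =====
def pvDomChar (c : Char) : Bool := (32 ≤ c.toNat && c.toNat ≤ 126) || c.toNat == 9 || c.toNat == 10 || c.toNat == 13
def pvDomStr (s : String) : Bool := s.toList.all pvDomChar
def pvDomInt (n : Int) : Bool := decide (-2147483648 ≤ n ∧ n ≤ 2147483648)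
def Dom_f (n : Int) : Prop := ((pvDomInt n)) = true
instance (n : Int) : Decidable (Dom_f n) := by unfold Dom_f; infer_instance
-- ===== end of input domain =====

-- B replaces the recursion with an explicit loop that collects characters and reverses at the end (idiomatic iterative form).


-- ===== PORT A =====
-- Literal port of A's recursion, with a Nat fuel making it total (the fuel never
-- runs out on the admitted inputs: Python diverges only for n < 0, excluded by Pre_f).
def fA (fuel : Nat) (n : Int) : String :=
  match fuel with
  | 0 => ""
  | fuel + 1 =>
    if n == 0 then ""
    else if n == 1 then "A"
    else if PySem.Int.mod n 2 == 0 then fA fuel (PySem.Int.floordiv n 2) ++ "B"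
    else fA fuel (n - 1) ++ "A"

def f (n : Int) : String := fA (n.toNat + 1) n

-- ===== PORT B =====
-- The while-loop of Source B, with the same fuel guard; appending to the python list
-- = prepending to the accumulator, since the list is reversed before joining.
def fLoop (fuel : Nat) (n : Int) (acc : List Char) : List Char :=
  match fuel with
  | 0 => acc
  | fuel + 1 =>
    if n ≤ 1 then acc
    else if PySem.Int.mod n 2 == 0 then fLoop fuel (PySem.Int.floordiv n 2) ('B' :: acc)
    else fLoop fuel (n - 1) ('A' :: acc)

def f_alt (n : Int) : String :=
  if n == 0 then "" else String.ofList ('A' :: fLoop (n.toNat + 1) n [])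

-- ===== PRECONDITION & SPEC =====
-- Pre_f excludes n < 0, where Python A recurses forever (RecursionError).
def Pre_f (n : Int) : Prop := 0 ≤ n
instance (n : Int) : Decidable (Pre_f n) := by unfold Pre_f; infer_instance
def pvWitness_f : Int := 6

def Spec_f (n : Int) (out : String) : Prop := out = f_alt n
instance (n : Int) (out : String) : Decidable (Spec_f n out) := by unfold Spec_f; infer_instance

-- ===== CLAIM (what is proved, stated in full; the proofs are below) =====
def Claim_equal_f : Prop := ∀ (n : Int), Dom_f n → Pre_f n → Spec_f n (f n)

-- ===== LEMMAS AND PROOFS =====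

-- Main invariant: with enough fuel and 1 ≤ n, A's string followed by acc equals
-- 'A' :: the loop's output (on the same fuel).
theorem fA_toList (fuel : Nat) :
    ∀ n : Int, 1 ≤ n → n.toNat < fuel →
      ∀ acc : List Char, (fA fuel n).toList ++ acc = 'A' :: fLoop fuel n acc := by
  induction fuel with
  | zero => intro n h1 h2; omega
  | succ fuel ih =>
    intro n h1 hf acc
    rcases eq_or_lt_of_le h1 with h1' | h2
    · -- n = 1
      rw [fA, fLoop, if_neg (by simp; omega), if_pos (by simp; omega), if_pos (by omega)]
      have ha : "A".toList = ['A'] := by decide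
      rw [ha, List.singleton_append]
    · -- 2 ≤ n
      have hn2 : (2:Int) ≤ n := by omega
      have hfd := PySem.Int.floordiv_eq_ediv_of_pos (a := n) (b := 2) (by omega)
      by_cases hm : PySem.Int.mod n 2 == 0
      · rw [fA, fLoop, if_neg (by simp; omega), if_neg (by simp; omega), if_pos hm,
          if_neg (by omega : ¬ n ≤ 1), if_pos hm]
        have hb : "B".toList = ['B'] := by decide
        rw [String.toList_append, hb, List.append_assoc, List.singleton_append]
        exact ih (PySem.Int.floordiv n 2) (by rw [hfd]; omega) (by rw [hfd]; omega) ('B' :: acc)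
      · rw [fA, fLoop, if_neg (by simp; omega), if_neg (by simp; omega), if_neg hm,
          if_neg (by omega : ¬ n ≤ 1), if_neg hm]
        have ha : "A".toList = ['A'] := by decide
        rw [String.toList_append, ha, List.append_assoc, List.singleton_append]
        exact ih (n - 1) (by omega) (by omega) ('A' :: acc)

-- ===== VERDICT (by name: the statement is the Claim_ definition above) =====
theorem f_spec : Claim_equal_f := by
  intro n _ hpre
  unfold Spec_f f f_alt
  rcases eq_or_ne n 0 with rfl | hn0
  · rw [fA]; norm_num
  · have h1 : 1 ≤ n := by unfold Pre_f at hpre; omega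
    rw [if_neg (by simpa using hn0)]
    have h := fA_toList (n.toNat + 1) n h1 (by omega) []
    simp only [List.append_nil] at h
    apply String.toList_injective
    rw [String.toList_ofList]
    exact h
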